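-- pv_equiv track=rewrite | github.com/anahitahassan/course-schedule-generator | Anahita/diffver/main.py | f
-- ===== SOURCE A (Python) =====
-- def f(monday):
--     class1 = []
--     class2 = []
--     class3 = []
--     for elem in monday:
--         if elem[0] == '15122':
--             class1.append(elem)
--         if elem[0] == '21127':
--             class2.append(elem)
--         if elem[0] == '21241':
--             class3.append(elem)
--     result = [class1, class2, class3]
--     return result
-- ===== SOURCE B (Python) =====
-- def f(monday):
--     order = {'15122': 0, '21127': 1, '21241': 2}
--     keys = [order.get(e[0], 3) for e in monday]
--     n0 = keys.count(0)
--     n1 = keys.count(1)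
--     n2 = keys.count(2)
--     s = sorted(monday, key=lambda e: order.get(e[0], 3))
--     return [s[:n0], s[n0:n0 + n1], s[n0 + n1:n0 + n1 + n2]]
-- ===== Notes on version B (the rewrite author's own statement) =====
-- stated objective: alternative
-- what changed: Replaces A's single pass appending into three accumulator lists by a bucket-index stable sort of the whole input followed by counting and slicing out the three leading runs (sort-then-slice); stability of the sort preserves A's element order within each bucket.
import Mathlib
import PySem

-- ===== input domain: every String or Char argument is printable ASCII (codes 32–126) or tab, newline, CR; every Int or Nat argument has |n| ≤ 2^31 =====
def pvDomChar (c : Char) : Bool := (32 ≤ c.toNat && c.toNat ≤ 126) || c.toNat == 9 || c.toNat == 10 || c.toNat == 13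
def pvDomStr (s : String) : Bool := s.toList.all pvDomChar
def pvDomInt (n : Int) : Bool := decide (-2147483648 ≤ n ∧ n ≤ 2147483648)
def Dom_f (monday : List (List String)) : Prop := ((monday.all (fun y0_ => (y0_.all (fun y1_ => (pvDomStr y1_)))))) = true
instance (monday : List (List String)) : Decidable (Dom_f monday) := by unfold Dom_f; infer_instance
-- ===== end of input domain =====

-- B replaces A's single accumulating pass by a stable sort on a bucket index followed
-- by counting and slicing; return values agree on all inputs whose rows are nonempty
-- (elsewhere Python raises IndexError at elem[0]).

-- ===== PORT A =====
-- elem[0] is PySem.List.pyGet? elem 0; inside Pre_f every row is nonempty so it is some _.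
-- (getD "" is only reached outside Pre_f, where Python raises.)
def fHead (e : List String) : String := (PySem.List.pyGet? e 0).getD ""

def fStep (acc : List (List String) × List (List String) × List (List String))
    (elem : List String) : List (List String) × List (List String) × List (List String) :=
  let acc := if fHead elem == "15122" then (acc.1 ++ [elem], acc.2.1, acc.2.2) else acc
  let acc := if fHead elem == "21127" then (acc.1, acc.2.1 ++ [elem], acc.2.2) else acc
  if fHead elem == "21241" then (acc.1, acc.2.1, acc.2.2 ++ [elem]) else acc

def f (monday : List (List String)) : List (List (List String)) :=
  let st := monday.foldl fStep ([], [], [])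
  [st.1, st.2.1, st.2.2]

-- ===== PORT B =====
-- order = {'15122': 0, '21127': 1, '21241': 2}
def bOrder : PySem.Dict String Int :=
  ((PySem.Dict.empty.insert "15122" 0).insert "21127" 1).insert "21241" 2

-- order.get(e[0], 3)
def bKey (e : List String) : Int := bOrder.getD (fHead e) 3

def f_alt (monday : List (List String)) : List (List (List String)) :=
  let keys := monday.map bKey
  let n0 : Int := PySem.List.count keys 0
  let n1 : Int := PySem.List.count keys 1
  let n2 : Int := PySem.List.count keys 2
  let s := PySem.List.sorted monday bKey false
  [PySem.List.slice s none (some n0),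
   PySem.List.slice s (some n0) (some (n0 + n1)),
   PySem.List.slice s (some (n0 + n1)) (some (n0 + n1 + n2))]

-- ===== PRECONDITION & SPEC =====
-- Pre_f excludes exactly the inputs containing an empty row, on which Python A
-- (and B) raise IndexError at elem[0].
def Pre_f (monday : List (List String)) : Prop := ∀ e ∈ monday, e ≠ []
instance (monday : List (List String)) : Decidable (Pre_f monday) := by unfold Pre_f; infer_instance

def pvWitness_f : List (List String) := [["15122", "a"], ["21241"], ["99999"]]

def Spec_f (monday : List (List String)) (out : List (List (List String))) : Prop := out = f_alt monday
instance (monday : List (List String)) (out : List (List (List String))) : Decidable (Spec_f monday out) := by unfold Spec_f; infer_instance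

-- ===== CLAIM =====
def Claim_equal_f : Prop := ∀ (monday : List (List String)), Dom_f monday → Pre_f monday → Spec_f monday (f monday)

-- ===== LEMMAS AND PROOFS =====

-- the bucket group with index i, in input order
def bGrp (i : Int) (xs : List (List String)) : List (List String) :=
  xs.filter (fun e => bKey e == i)

-- the dict lookup as an if-chain on the head string
theorem bKey_cases (e : List String) :
    bKey e = (if fHead e = "15122" then 0 else if fHead e = "21127" then 1
              else if fHead e = "21241" then 2 else 3) := by
  unfold bKey bOrder
  simp only [PySem.Dict.getD_insert, PySem.Dict.getD_empty]
  split_ifs <;> simp_all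

theorem bKey_mem (e : List String) :
    bKey e = 0 ∨ bKey e = 1 ∨ bKey e = 2 ∨ bKey e = 3 := by
  rw [bKey_cases]; split_ifs <;> simp

-- insertBy into p ++ q where x goes exactly between them
theorem insertBy_middle (before : List String → List String → Bool) (x : List String)
    (p q : List (List String))
    (hp : ∀ y ∈ p, before x y = false) (hq : ∀ y ∈ q, before x y = true) :
    PySem.List.insertBy before x (p ++ q) = p ++ x :: q := by
  induction p with
  | nil =>
    cases q with
    | nil => simp [PySem.List.insertBy]
    | cons h t => simp [PySem.List.insertBy, hq h (by simp)]
  | cons y p' ih =>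
    simp only [List.cons_append, PySem.List.insertBy, hp y (by simp), Bool.false_eq_true,
      if_false]
    rw [ih (fun z hz => hp z (by simp [hz]))]

theorem bGrp_key (i : Int) (xs : List (List String)) :
    ∀ y ∈ bGrp i xs, bKey y = i := by
  intro y hy
  have := List.of_mem_filter hy
  simpa using this

-- the stable sort lays the four groups out in order
theorem sorted_eq_groups (xs : List (List String)) :
    PySem.List.sorted xs bKey false
      = bGrp 0 xs ++ bGrp 1 xs ++ bGrp 2 xs ++ bGrp 3 xs := by
  induction xs using List.reverseRecOn with
  | nil => simp [PySem.List.sorted, bGrp]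
  | append_singleton xs x ih =>
    have hstep : PySem.List.sorted (xs ++ [x]) bKey false
        = PySem.List.insertBy (fun a b => decide (bKey a < bKey b)) x
            (PySem.List.sorted xs bKey false) := by
      rw [PySem.List.sorted_eq_foldl_insertBy, PySem.List.sorted_eq_foldl_insertBy,
        List.foldl_append, List.foldl_cons, List.foldl_nil]
    have hgrp : ∀ i : Int, bGrp i (xs ++ [x])
        = bGrp i xs ++ (if bKey x == i then [x] else []) := by
      intro i; by_cases h : bKey x = i <;> simp [bGrp, List.filter_append, h]
    rcases bKey_mem x with hk | hk | hk | hk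
    · have h := insertBy_middle (fun a b => decide (bKey a < bKey b)) x
        (bGrp 0 xs) (bGrp 1 xs ++ bGrp 2 xs ++ bGrp 3 xs)
        (by intro y hy; have := bGrp_key 0 xs y hy; simp [hk, this])
        (by intro y hy
            simp only [List.append_assoc, List.mem_append] at hy
            rcases hy with h | h | h <;>
              [have := bGrp_key 1 xs y h; have := bGrp_key 2 xs y h;
               have := bGrp_key 3 xs y h] <;> simp [hk, this])
      rw [hstep, ih]
      simp only [List.append_assoc] at h ⊢
      rw [h]
      simp [hgrp, hk, List.append_assoc]
    · have h := insertBy_middle (fun a b => decide (bKey a < bKey b)) x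
        (bGrp 0 xs ++ bGrp 1 xs) (bGrp 2 xs ++ bGrp 3 xs)
        (by intro y hy
            simp only [List.mem_append] at hy
            rcases hy with h | h <;>
              [have := bGrp_key 0 xs y h; have := bGrp_key 1 xs y h] <;>
              simp [hk, this])
        (by intro y hy
            simp only [List.mem_append] at hy
            rcases hy with h | h <;>
              [have := bGrp_key 2 xs y h; have := bGrp_key 3 xs y h] <;>
              simp [hk, this])
      rw [hstep, ih]
      simp only [List.append_assoc] at h ⊢
      rw [h]
      simp [hgrp, hk]
    · have h := insertBy_middle (fun a b => decide (bKey a < bKey b)) x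
        (bGrp 0 xs ++ bGrp 1 xs ++ bGrp 2 xs) (bGrp 3 xs)
        (by intro y hy
            simp only [List.append_assoc, List.mem_append] at hy
            rcases hy with h | h | h <;>
              [have := bGrp_key 0 xs y h; have := bGrp_key 1 xs y h;
               have := bGrp_key 2 xs y h] <;> simp [hk, this])
        (by intro y hy; have := bGrp_key 3 xs y hy; simp [hk, this])
      rw [hstep, ih]
      simp only [List.append_assoc] at h ⊢
      rw [h]
      simp [hgrp, hk]
    · have h := insertBy_middle (fun a b => decide (bKey a < bKey b)) x
        (bGrp 0 xs ++ bGrp 1 xs ++ bGrp 2 xs ++ bGrp 3 xs) []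
        (by intro y hy
            simp only [List.append_assoc, List.mem_append] at hy
            rcases hy with h | h | h | h <;>
              [have := bGrp_key 0 xs y h; have := bGrp_key 1 xs y h;
               have := bGrp_key 2 xs y h; have := bGrp_key 3 xs y h] <;>
              simp [hk, this])
        (by intro y hy; simp at hy)
      rw [hstep, ih]
      simp only [List.append_assoc, List.append_nil] at h ⊢
      rw [h]
      simp [hgrp, hk]

-- counting keys counts group lengths
theorem count_map_bKey (xs : List (List String)) (i : Int) :
    (xs.map bKey).count i = (bGrp i xs).length := by
  rw [List.count_eq_countP, List.countP_map, bGrp, ← List.countP_eq_length_filter]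
  rfl

-- A's fold state appends the three matched filters
theorem f_fold_inv (monday : List (List String)) (a b c : List (List String)) :
    monday.foldl fStep (a, b, c)
    = (a ++ monday.filter (fun e => fHead e == "15122"),
       b ++ monday.filter (fun e => fHead e == "21127"),
       c ++ monday.filter (fun e => fHead e == "21241")) := by
  induction monday generalizing a b c with
  | nil => simp
  | cons x xs ih =>
    simp only [List.foldl_cons, List.filter_cons]
    by_cases h1 : fHead x == "15122" <;> by_cases h2 : fHead x == "21127" <;>
      by_cases h3 : fHead x == "21241" <;>
      simp [fStep, h1, h2, h3, ih, List.append_assoc]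

-- the three matched bucket filters are A's three filters
theorem bGrp_eq_filter_code (xs : List (List String)) :
    bGrp 0 xs = xs.filter (fun e => fHead e == "15122")
    ∧ bGrp 1 xs = xs.filter (fun e => fHead e == "21127")
    ∧ bGrp 2 xs = xs.filter (fun e => fHead e == "21241") := by
  refine ⟨?_, ?_, ?_⟩ <;> (apply List.filter_congr; intro e _; rw [bKey_cases]) <;>
    split_ifs <;> simp_all

-- ===== VERDICT =====
theorem f_spec : Claim_equal_f := by
  intro monday _ _
  unfold Spec_f f f_alt
  simp only [f_fold_inv, List.nil_append]
  obtain ⟨h0, h1, h2⟩ := bGrp_eq_filter_code monday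
  have hsort := sorted_eq_groups monday
  have hc0 := count_map_bKey monday 0
  have hc1 := count_map_bKey monday 1
  have hc2 := count_map_bKey monday 2
  rw [← h0, ← h1, ← h2]
  simp only [hsort, PySem.List.count_eq, hc0, hc1, hc2]
  have e012 : ((bGrp 0 monday).length : Int) + ((bGrp 1 monday).length : Int)
      + ((bGrp 2 monday).length : Int)
      = ((bGrp 0 monday).length + (bGrp 1 monday).length + (bGrp 2 monday).length : Nat) := by
    push_cast; ring
  have e01 : ((bGrp 0 monday).length : Int) + ((bGrp 1 monday).length : Int)
      = ((bGrp 0 monday).length + (bGrp 1 monday).length : Nat) := by push_cast; ring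
  rw [e012, e01, PySem.List.slice_to_natCast, PySem.List.slice_natCast,
    PySem.List.slice_natCast]
  simp only [List.cons.injEq, and_true]
  refine ⟨?_, ?_, ?_⟩
  · rw [List.append_assoc, List.append_assoc, List.take_left]
  · rw [show (bGrp 0 monday).length + (bGrp 1 monday).length - (bGrp 0 monday).length
        = (bGrp 1 monday).length from by omega,
      List.append_assoc, List.append_assoc, List.drop_left, List.take_left]
  · rw [show (bGrp 0 monday).length + (bGrp 1 monday).length + (bGrp 2 monday).length
        - ((bGrp 0 monday).length + (bGrp 1 monday).length)
        = (bGrp 2 monday).length from by omega,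
      List.append_assoc ((bGrp 0 monday) ++ (bGrp 1 monday)),
      show (bGrp 0 monday).length + (bGrp 1 monday).length
        = (bGrp 0 monday ++ bGrp 1 monday).length from by simp,
      List.drop_left, List.take_left]
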